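-- pv_equiv track=rewrite | github.com/CreativePenguin/stuy-cs | intro-comp-sci2/python/Classwork(3-1-2018)Review.py | xyBalance
-- ===== SOURCE A (Python) =====
-- def xyBalance(s):
--     i = 0
--     isBalance = True
--     while i < len(s):
--         if s[i] == "x":
--             isBalance = False
--         if s[i] == "y":
--             isBalance = True
--         i += 1
--     return isBalance
-- ===== SOURCE B (Python) =====
-- def xyBalance(s):
--     return s.rfind("x") <= s.rfind("y")
-- ===== Notes on version B (the rewrite author's own statement) =====
-- stated objective: faster
-- what changed: Replaces the forward flag-maintaining character-by-character scan with a single comparison of the two last-occurrence indices computed by str.rfind.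
import Mathlib
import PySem

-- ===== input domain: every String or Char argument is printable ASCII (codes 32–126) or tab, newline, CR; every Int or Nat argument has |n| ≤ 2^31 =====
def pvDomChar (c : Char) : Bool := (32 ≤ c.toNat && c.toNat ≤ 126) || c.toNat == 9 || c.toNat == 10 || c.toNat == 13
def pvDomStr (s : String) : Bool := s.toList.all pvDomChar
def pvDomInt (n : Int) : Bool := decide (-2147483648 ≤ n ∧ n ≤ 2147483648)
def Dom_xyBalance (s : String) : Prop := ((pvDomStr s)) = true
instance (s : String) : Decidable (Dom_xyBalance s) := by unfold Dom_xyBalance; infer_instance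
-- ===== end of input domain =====

-- B replaces A's forward flag-maintaining scan by a comparison of last-occurrence indices (idiomatic).

-- ===== PORT A =====
-- one iteration of A's while-loop body: the two ifs in order, updating the flag
def xyStep (b : Bool) (c : Char) : Bool :=
  let b1 := if c = 'x' then false else b
  if c = 'y' then true else b1

def xyBalance (s : String) : Bool :=
  s.toList.foldl xyStep true

-- ===== PORT B =====
def xyBalance_alt (s : String) : Bool :=
  decide (PySem.Str.rfind s "x" ≤ PySem.Str.rfind s "y")

-- ===== PRECONDITION & SPEC =====
def Spec_xyBalance (s : String) (out : Bool) : Prop := out = xyBalance_alt s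
instance (s : String) (out : Bool) : Decidable (Spec_xyBalance s out) := by unfold Spec_xyBalance; infer_instance

-- ===== CLAIM (what is proved, stated in full; the proofs are below) =====
def Claim_equal_xyBalance : Prop := ∀ (s : String), Dom_xyBalance s → Spec_xyBalance s (xyBalance s)

-- ===== LEMMAS AND PROOFS =====

-- rfind.go only ever returns values ≤ its start index
theorem xy_go_le (l : List Char) (c : Char) (n : Nat) :
    PySem.Chars.rfind.go l [c] n ≤ (n : Int) := by
  induction n with
  | zero => simp only [PySem.Chars.rfind.go]; split <;> simp
  | succ j ih =>
    simp only [PySem.Chars.rfind.go]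
    split
    · omega
    · exact le_trans ih (by push_cast; omega)

-- rfind of a single character is a strict index: < length
theorem xy_rfind_lt (l : List Char) (c : Char) :
    PySem.Chars.rfind l [c] < (l.length : Int) := by
  unfold PySem.Chars.rfind
  cases h : l.length with
  | zero =>
    have hl : l = [] := List.eq_nil_of_length_eq_zero h
    subst hl
    simp [PySem.Chars.rfind.go, List.isPrefixOf]
  | succ m =>
    simp only [PySem.Chars.rfind.go]
    have hdrop : List.drop (m + 1) l = [] := List.drop_eq_nil_of_le (by omega)
    rw [hdrop]
    simp only [List.isPrefixOf, Bool.false_eq_true, if_false]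
    have := xy_go_le l c m
    push_cast
    omega

-- checking indices strictly below the length ignores a final appended element
theorem xy_go_append (l : List Char) (a c : Char) (n : Nat) (hn : n < l.length) :
    PySem.Chars.rfind.go (l ++ [a]) [c] n = PySem.Chars.rfind.go l [c] n := by
  induction n with
  | zero =>
    simp only [PySem.Chars.rfind.go]
    cases l with
    | nil => simp at hn
    | cons d t => simp [List.isPrefixOf]
  | succ j ih =>
    simp only [PySem.Chars.rfind.go]
    have hlt : j < l.length := by omega
    have hne : List.drop (j + 1) l ≠ [] := by
      simp [List.drop_eq_nil_iff]; omega
    have hd : List.drop (j + 1) (l ++ [a]) = List.drop (j + 1) l ++ [a] :=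
      List.drop_append_of_le_length (by omega)
    rw [hd]
    obtain ⟨d, t, ht⟩ := List.exists_cons_of_ne_nil hne
    rw [ht]
    simp only [List.cons_append, List.isPrefixOf]
    rw [ih hlt]
    rfl

-- rfind over a string extended by one character on the right
theorem xy_rfind_append (l : List Char) (a c : Char) :
    PySem.Chars.rfind (l ++ [a]) [c] =
      if a = c then (l.length : Int) else PySem.Chars.rfind l [c] := by
  unfold PySem.Chars.rfind
  have hlen : (l ++ [a]).length = l.length + 1 := by simp
  rw [hlen]
  simp only [PySem.Chars.rfind.go]
  have hdrop1 : List.drop (l.length + 1) (l ++ [a]) = [] :=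
    List.drop_eq_nil_of_le (by simp)
  rw [hdrop1]
  simp only [List.isPrefixOf, Bool.false_eq_true, if_false]
  cases hL : l.length with
  | zero =>
    have hl : l = [] := List.eq_nil_of_length_eq_zero hL
    subst hl
    simp only [List.nil_append, PySem.Chars.rfind.go, List.isPrefixOf]
    by_cases hac : a = c <;> simp [hac]
    · intro h; exact hac h.symm
  | succ m =>
    simp only [PySem.Chars.rfind.go]
    have hdl : List.drop (m + 1) l = [] := List.drop_eq_nil_of_le (by omega)
    have hd : List.drop (m + 1) (l ++ [a]) = [a] := by
      rw [List.drop_append_of_le_length (by omega), hdl]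
      simp
    rw [hd, hdl]
    simp only [List.isPrefixOf, Bool.false_eq_true, if_false, Bool.and_true]
    by_cases hac : a = c
    · simp [hac]
    · have : (c == a) = false := by
        simp; intro h; exact hac h.symm
      rw [this]
      simp only [Bool.false_eq_true, if_false]
      rw [if_neg hac]
      exact xy_go_append l a c m (by omega)

-- A's fold equals B's last-occurrence comparison
theorem xy_main (l : List Char) :
    l.foldl xyStep true =
      decide (PySem.Chars.rfind l ['x'] ≤ PySem.Chars.rfind l ['y']) := by
  induction l using List.reverseRecOn with
  | nil => simp [PySem.Chars.rfind, PySem.Chars.rfind.go, List.isPrefixOf]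
  | append_singleton l a ih =>
    rw [List.foldl_append, List.foldl_cons, List.foldl_nil,
      xy_rfind_append l a 'x', xy_rfind_append l a 'y']
    by_cases hx : a = 'x'
    · have hy : ¬ a = 'y' := by subst hx; decide
      have hlt := xy_rfind_lt l 'y'
      simp [xyStep, hx]
      omega
    · by_cases hy : a = 'y'
      · have hlt := xy_rfind_lt l 'x'
        simp [xyStep, hy]
        omega
      · simp [xyStep, hx, hy, ih]

-- ===== VERDICT (by name: the statement is the Claim_ definition above) =====
theorem xyBalance_spec : Claim_equal_xyBalance := by
  intro s _
  show xyBalance s = xyBalance_alt s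
  unfold xyBalance xyBalance_alt
  simp only [PySem.Str.rfind_eq]
  exact xy_main s.toList
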